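-- pv_equiv track=rewrite | github.com/PolloRollo/ProjectEuler | problems.py | problem_056
-- ===== SOURCE A (Python) =====
-- def problem_056(n=100):
--     """
--     Considering natural numbers of the form, a**b, where a, b < n, what is the maximum digital sum?
--     """
--     max_digit_sum = 0
--     for a in range(1, n):
--         for b in range(1, n):
--             num = a**b
--             digit_sum = sum([int(i) for i in str(num)])
--             if digit_sum > max_digit_sum:
--                 max_digit_sum = digit_sum
--     return max_digit_sum
-- ===== SOURCE B (Python) =====
-- def problem_056(n=100):
--     best = 0
--     for a in range(1, n):
--         num = 1
--         for _ in range(1, n):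
--             num *= a
--             s = 0
--             m = num
--             while m > 0:
--                 s += m % 10
--                 m //= 10
--             if s > best:
--                 best = s
--     return best
-- ===== Notes on version B (the rewrite author's own statement) =====
-- stated objective: alternative
-- what changed: B threads a running power (num *= a) through the inner loop instead of recomputing a**b each iteration, and extracts the digit sum arithmetically by repeated modulus and floor division by ten instead of converting to a string.
import Mathlib
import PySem

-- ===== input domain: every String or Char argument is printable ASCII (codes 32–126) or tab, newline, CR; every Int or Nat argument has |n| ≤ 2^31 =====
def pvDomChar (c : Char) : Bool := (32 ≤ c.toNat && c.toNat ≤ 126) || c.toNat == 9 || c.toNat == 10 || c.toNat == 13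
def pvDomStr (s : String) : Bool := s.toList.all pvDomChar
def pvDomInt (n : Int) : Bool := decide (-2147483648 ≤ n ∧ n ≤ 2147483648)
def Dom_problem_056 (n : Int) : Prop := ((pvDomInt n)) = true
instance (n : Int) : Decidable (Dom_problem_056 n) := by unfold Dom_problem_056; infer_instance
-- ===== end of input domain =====

-- B recomputes nothing: it threads a running power (num *= a) through the inner loop and
-- extracts the digit sum arithmetically (% 10 / // 10) instead of via str(); alternative, not measured faster.

-- ===== PORT A =====
-- sum([int(i) for i in str(num)]); every character of str(num) for num ≥ 0 is a digit,
-- so int(i) never raises and the `.getD 0` default is unreachable on A's actual arguments.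
def pvDigitSumStr (num : Int) : Int :=
  ((PySem.Int.toChars num).map (fun c => (PySem.Int.ofChars? [c]).getD 0)).sum

def problem_056 (n : Int) : Int :=
  (PySem.List.pyRange 1 n).foldl (fun max_digit_sum a =>
    (PySem.List.pyRange 1 n).foldl (fun max_digit_sum b =>
      -- a ** b with b ≥ 1 (Python integer power, exponent nonnegative here)
      let num := a ^ b.toNat
      let digit_sum := pvDigitSumStr num
      if digit_sum > max_digit_sum then digit_sum else max_digit_sum) max_digit_sum) 0

-- ===== PORT B =====
-- `while m > 0: s += m % 10; m //= 10`
def pvDigitLoop (m s : Int) : Int :=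
  if _h : 0 < m then pvDigitLoop (PySem.Int.floordiv m 10) (s + PySem.Int.mod m 10) else s
  termination_by m.toNat
  decreasing_by
    rw [PySem.Int.floordiv_eq_ediv_of_pos (by norm_num)]
    omega

def problem_056_alt (n : Int) : Int :=
  (PySem.List.pyRange 1 n).foldl (fun best a =>
    ((PySem.List.pyRange 1 n).foldl (fun st _ =>
      let num := st.1 * a
      let s := pvDigitLoop num 0
      (num, if s > st.2 then s else st.2)) ((1 : Int), best)).2) 0

-- ===== PRECONDITION & SPEC =====
def Spec_problem_056 (n : Int) (out : Int) : Prop := out = problem_056_alt n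
instance (n : Int) (out : Int) : Decidable (Spec_problem_056 n out) := by unfold Spec_problem_056; infer_instance

-- ===== CLAIM (what is proved, stated in full; the proofs are below) =====
def Claim_equal_problem_056 : Prop := ∀ (n : Int), Dom_problem_056 n → Spec_problem_056 n (problem_056 n)

-- ===== LEMMAS AND PROOFS =====

-- reference digit sum (on Nat, structural)
def pvArithDS (k : Nat) : Int :=
  if _h : k = 0 then 0 else ((k % 10 : Nat) : Int) + pvArithDS (k / 10)
  decreasing_by omega

lemma pvArithDS_zero : pvArithDS 0 = 0 := by rw [pvArithDS]; rfl

lemma pvArithDS_pos (k : Nat) (hk : k ≠ 0) :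
    pvArithDS k = ((k % 10 : Nat) : Int) + pvArithDS (k / 10) := by
  rw [pvArithDS, dif_neg hk]

lemma pvDigitLoop_eq (m s : Int) (hm : 0 ≤ m) : pvDigitLoop m s = s + pvArithDS m.toNat := by
  by_cases h : 0 < m
  · rw [pvDigitLoop, dif_pos h,
      PySem.Int.floordiv_eq_ediv_of_pos (by norm_num), PySem.Int.mod_eq_emod_of_pos (by norm_num)]
    have hrec := pvDigitLoop_eq (m / 10) (s + m % 10) (by omega)
    have h1 : (m / 10).toNat = m.toNat / 10 := by omega
    have h2 : (m % 10) = ((m.toNat % 10 : Nat) : Int) := by omega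
    rw [hrec, h1, h2, pvArithDS_pos m.toNat (by omega)]; ring
  · rw [pvDigitLoop, dif_neg h]
    have : m.toNat = 0 := by omega
    rw [this, pvArithDS_zero]; ring
  termination_by m.toNat
  decreasing_by omega

lemma pvDval_digitChar (d : Nat) (h : d < 10) :
    ((PySem.Int.ofChars? [Nat.digitChar d]).getD 0) = (d : Int) := by
  interval_cases d <;> rfl

lemma pvTdcSum (f : Nat) : ∀ (k : Nat) (acc : List Char), k < f →
    ((Nat.toDigitsCore 10 f k acc).map (fun c => (PySem.Int.ofChars? [c]).getD 0)).sum
      = pvArithDS k + ((acc.map (fun c => (PySem.Int.ofChars? [c]).getD 0)).sum) := by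
  induction f with
  | zero => intro k acc h; omega
  | succ f ih =>
    intro k acc h
    rw [Nat.toDigitsCore]
    by_cases h0 : k / 10 = 0
    · simp only [h0, if_true, List.map_cons, List.sum_cons]
      rw [pvDval_digitChar (k % 10) (by omega)]
      by_cases hk : k = 0
      · subst hk; simp [pvArithDS_zero]
      · rw [pvArithDS_pos k hk, h0, pvArithDS_zero]; push_cast; ring
    · simp only [h0, if_false]
      rw [ih (k / 10) _ (by omega)]
      simp only [List.map_cons, List.sum_cons]
      rw [pvDval_digitChar (k % 10) (by omega)]
      rw [pvArithDS_pos k (by omega)]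
      push_cast; ring

lemma pvDigitSumStr_eq (num : Int) (h : 0 ≤ num) : pvDigitSumStr num = pvArithDS num.toNat := by
  unfold pvDigitSumStr
  rw [PySem.Int.toChars, if_neg (by omega)]
  rw [Nat.toDigits]
  rw [pvTdcSum (num.toNat + 1) num.toNat [] (by omega)]
  simp

-- the two digit sums agree on the positive powers both programs feed them
lemma pvDigitAgree (num : Int) (h : 0 ≤ num) : pvDigitLoop num 0 = pvDigitSumStr num := by
  rw [pvDigitLoop_eq num 0 h, pvDigitSumStr_eq num h]; ring

-- inner loop: threading the running power a^(i-1) through B's loop matches A's direct a^b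
lemma pvInner (n a : Int) (ha : 1 ≤ a) :
    ∀ (i best : Int), 1 ≤ i →
    ((PySem.List.pyRange i n).foldl (fun st (_ : Int) =>
        let num := st.1 * a
        let s := pvDigitLoop num 0
        (num, if s > st.2 then s else st.2)) (a ^ (i - 1).toNat, best)).2
      = (PySem.List.pyRange i n).foldl (fun max_digit_sum b =>
          let num := a ^ b.toNat
          let digit_sum := pvDigitSumStr num
          if digit_sum > max_digit_sum then digit_sum else max_digit_sum) best := by
  intro i best hi
  by_cases hlt : i < n
  · rw [PySem.List.pyRange_one_cons hlt]
    simp only [List.foldl_cons]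
    have hpow : a ^ (i - 1).toNat * a = a ^ i.toNat := by
      have : i.toNat = (i - 1).toNat + 1 := by omega
      rw [this, pow_succ]
    have hpos : (0 : Int) ≤ a ^ i.toNat := by positivity
    have hds : pvDigitLoop (a ^ (i - 1).toNat * a) 0 = pvDigitSumStr (a ^ i.toNat) := by
      rw [hpow]; exact pvDigitAgree _ hpos
    have hstep : (i + 1 - 1).toNat = i.toNat := by omega
    have ih := pvInner n a ha (i + 1)
      (if pvDigitSumStr (a ^ i.toNat) > best then pvDigitSumStr (a ^ i.toNat) else best) (by omega)
    rw [hstep] at ih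
    rw [hds, hpow]
    exact ih
  · have hnil : PySem.List.pyRange i n = [] := by
      simp [PySem.List.pyRange]; omega
    simp [hnil]
  termination_by i => (n - i).toNat
  decreasing_by omega

-- ===== VERDICT (by name: the statement is the Claim_ definition above) =====
theorem problem_056_spec : Claim_equal_problem_056 := by
  intro n _
  unfold Spec_problem_056 problem_056 problem_056_alt
  refine (PySem.List.foldl_congr_mem _ _ _ _ ?_).symm
  intro best a hmem
  have ha : 1 ≤ a := (PySem.List.mem_pyRange_one.mp hmem).1
  have := pvInner n a ha 1 best (by omega)
  simpa using this
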